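-- pv_equiv track=rewrite | github.com/hgaldon/COMP431-HW4 | Server.py | is_valid_reverse_path
-- ===== SOURCE A (Python) =====
-- class SMTPResponses:
--     accepted = "250 OK"
--     rej_com = "500 Syntax error: command unrecognized"
--     rej_param = "501 Syntax error in parameters or arguments"
--     mail_input = "354 Start mail input; end with <CRLF>.<CRLF>"
--     seq = "503 Bad sequence of commands"
--
-- def is_valid_reverse_path(lp):
--     if len(lp) < 1:
--         return SMTPResponses.rej_param
--
--     special_chars = set('<>()[]\\.,;:@" \t')
--     for i, char in enumerate(lp):
--         if char in special_chars:
--             if i == 0: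
--                 return SMTPResponses.rej_param
--             elif char == '@' and i != 0:
--                 return is_valid_domain(lp.split('@', 1)[1], 0)
--             else:
--                 return SMTPResponses.rej_param
--
--     return SMTPResponses.rej_param
--
-- def is_valid_domain(d, dotCount):
--     if len(d) < 1 or d[0].isdigit():
--         return SMTPResponses.rej_param
--
--     for i, element in enumerate(d):
--         if not (element.isalpha() or element.isdigit()):
--             if i == 0:
--                 return SMTPResponses.rej_param
--             elif element == '>':
--                 return is_valid(d[i+1:])
--             elif element == '.':
--                 dotCount += 1
--                 return is_valid_domain(d[i+1:], dotCount)
--             else: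
--                 return SMTPResponses.rej_param
--
--     return SMTPResponses.rej_param
--
-- def is_valid(s):
--     s = s.lstrip(' \t')
--     if not s.startswith('\n') and not s.endswith('\n'):
--         return SMTPResponses.rej_com
--     else:
--         return SMTPResponses.accepted
-- ===== SOURCE B (Python) =====
-- class SMTPResponses:
--     accepted = "250 OK"
--     rej_com = "500 Syntax error: command unrecognized"
--     rej_param = "501 Syntax error in parameters or arguments"
--     mail_input = "354 Start mail input; end with <CRLF>.<CRLF>"
--     seq = "503 Bad sequence of commands"
--
-- def is_valid_reverse_path(lp):
--     # One iterative pass with an index cursor; no recursion, no split, no dotCount.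
--     specials = '<>()[]\\.,;:@" \t'
--     n = len(lp)
--     i = 0
--     while i < n and lp[i] not in specials:
--         i += 1
--     if i == 0 or i == n or lp[i] != '@':
--         return SMTPResponses.rej_param
--     j = i + 1
--     while True:
--         # a label: must start with a letter, then letters/digits
--         if j >= n or not (lp[j].isalpha()):
--             return SMTPResponses.rej_param
--         j += 1
--         while j < n and (lp[j].isalpha() or lp[j].isdigit()):
--             j += 1
--         if j >= n:
--             return SMTPResponses.rej_param
--         if lp[j] == '>':
--             rest = lp[j + 1:]
--             break
--         if lp[j] == '.':
--             j += 1
--         else: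
--             return SMTPResponses.rej_param
--     k = 0
--     while k < len(rest) and rest[k] in ' \t':
--         k += 1
--     rest = rest[k:]
--     if rest.startswith('\n') or rest.endswith('\n'):
--         return SMTPResponses.accepted
--     return SMTPResponses.rej_com
-- ===== Notes on version B (the rewrite author's own statement) =====
-- stated objective: simpler
-- what changed: Replaces A's three mutually recursive helpers (enumerate-scan that re-splits the string on '@', a per-label recursive is_valid_domain threading a dead dotCount, and a separate is_valid) with one function doing a single left-to-right cursor scan: find the first special char, then a label loop, then the lstrip/newline check inline; no recursion, no split, dotCount dropped.
import Mathlib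
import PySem

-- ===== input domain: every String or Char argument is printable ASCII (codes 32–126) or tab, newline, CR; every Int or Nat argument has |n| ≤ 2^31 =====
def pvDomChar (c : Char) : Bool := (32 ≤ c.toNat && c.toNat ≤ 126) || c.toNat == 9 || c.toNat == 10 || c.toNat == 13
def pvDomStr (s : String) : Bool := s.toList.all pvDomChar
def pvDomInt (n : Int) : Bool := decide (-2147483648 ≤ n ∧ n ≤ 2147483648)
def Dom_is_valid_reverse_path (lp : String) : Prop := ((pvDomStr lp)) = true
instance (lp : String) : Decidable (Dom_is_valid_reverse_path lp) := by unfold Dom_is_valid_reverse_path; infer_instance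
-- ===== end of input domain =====

-- B replaces A's three mutually recursive helper functions (split + recursive domain validation per
-- label) by one iterative cursor scan over the string; objective: simpler (no recursion, no split,
-- the dead dotCount dropped). Same return value everywhere.

-- module constants (SMTPResponses)
def pvAccepted : String := "250 OK"
def pvRejCom : String := "500 Syntax error: command unrecognized"
def pvRejParam : String := "501 Syntax error in parameters or arguments"

-- ===== PORT A =====
def pvA_specials : List Char := ['<','>','(',')','[',']','\\','.',',',';',':','@','"',' ','\t']

-- s.lstrip(' \t') : hand port, exact (drop leading ' ' and '\t')
def pvA_lstripSpTab : List Char → List Char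
  | [] => []
  | c :: r => if c = ' ' ∨ c = '\t' then pvA_lstripSpTab r else c :: r

-- is_valid(s)
def pvA_is_valid (s0 : List Char) : String :=
  let s := pvA_lstripSpTab s0
  if ¬ (PySem.Chars.startswith s ['\n'] = true) ∧ ¬ (PySem.Chars.endswith s ['\n'] = true) then
    pvRejCom
  else
    pvAccepted

-- lp.split('@', 1) : hand port, exact — (piece before the first '@', rest after it if any)
def pvA_splitAt1 : List Char → List Char × Option (List Char)
  | [] => ([], none)
  | c :: r =>
    if c = '@' then ([], some r)
    else
      let p := pvA_splitAt1 r
      (c :: p.1, p.2)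

mutual
-- is_valid_domain(d, dotCount)
def pvA_is_valid_domain (d : List Char) (dotCount : Int) : String :=
  match d with
  | [] => pvRejParam                                   -- len(d) < 1
  | c :: r =>
    if PySem.Chars.isdigit c then pvRejParam           -- d[0].isdigit()
    else pvA_domLoop (c :: r) 0 dotCount
  termination_by (d.length, 1)

-- the `for i, element in enumerate(d)` loop of is_valid_domain
def pvA_domLoop (d : List Char) (i : Nat) (dotCount : Int) : String :=
  match d with
  | [] => pvRejParam                                   -- loop fell through
  | e :: rest =>
    if PySem.Chars.isalpha e || PySem.Chars.isdigit e then pvA_domLoop rest (i + 1) dotCount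
    else if i = 0 then pvRejParam
    else if e = '>' then pvA_is_valid rest             -- d[i+1:]
    else if e = '.' then pvA_is_valid_domain rest (dotCount + 1)
    else pvRejParam
  termination_by (d.length, 0)
end

-- the `for i, char in enumerate(lp)` loop of is_valid_reverse_path
def pvA_scan (orig : List Char) : List Char → Nat → String
  | [], _ => pvRejParam                                -- loop fell through
  | c :: rest, i =>
    if c ∈ pvA_specials then
      if i = 0 then pvRejParam
      else if c = '@' then
        match (pvA_splitAt1 orig).2 with               -- lp.split('@', 1)[1]
        | some s => pvA_is_valid_domain s 0
        | none => pvRejParam                           -- unreachable: '@' was just found in orig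
    else pvRejParam
    else pvA_scan orig rest (i + 1)

def is_valid_reverse_path (lp : String) : String :=
  let l := lp.toList
  if l.length < 1 then pvRejParam else pvA_scan l l 0

-- ===== PORT B =====
def pvB_specials : List Char := ['<','>','(',')','[',']','\\','.',',',';',':','@','"',' ','\t']

-- the first `while i < n and lp[i] not in specials` cursor: position, char and the suffix after it
def pvB_findSpecial : List Char → Nat → Option (Nat × Char × List Char)
  | [], _ => none
  | c :: r, i => if c ∈ pvB_specials then some (i, c, r) else pvB_findSpecial r (i + 1)

-- the `while k < len(rest) and rest[k] in ' \t'` cursor followed by rest[k:]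
def pvB_dropSpTab : List Char → List Char
  | [] => []
  | c :: r => if c = ' ' ∨ c = '\t' then pvB_dropSpTab r else c :: r

-- everything after the '>' terminator
def pvB_tail (rest : List Char) : String :=
  let s := pvB_dropSpTab rest
  if PySem.Chars.startswith s ['\n'] || PySem.Chars.endswith s ['\n'] then pvAccepted
  else pvRejCom

mutual
-- head of the `while True` label loop: a label must start with a letter
def pvB_labelStart (d : List Char) : String :=
  match d with
  | [] => pvRejParam
  | c :: r => if PySem.Chars.isalpha c then pvB_labelBody r else pvRejParam
  termination_by (d.length, 1)

-- the inner alnum cursor of the label loop, then dispatch on the stopping char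
def pvB_labelBody (d : List Char) : String :=
  match d with
  | [] => pvRejParam
  | c :: r =>
    if PySem.Chars.isalpha c || PySem.Chars.isdigit c then pvB_labelBody r
    else if c = '>' then pvB_tail r
    else if c = '.' then pvB_labelStart r
    else pvRejParam
  termination_by (d.length, 0)
end

def is_valid_reverse_path_alt (lp : String) : String :=
  match pvB_findSpecial lp.toList 0 with
  | none => pvRejParam                                 -- i == n (includes the empty string)
  | some (i, c, r) =>
    if i = 0 ∨ c ≠ '@' then pvRejParam else pvB_labelStart r

-- ===== PRECONDITION & SPEC =====
def Spec_is_valid_reverse_path (lp : String) (out : String) : Prop := out = is_valid_reverse_path_alt lp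
instance (lp : String) (out : String) : Decidable (Spec_is_valid_reverse_path lp out) := by unfold Spec_is_valid_reverse_path; infer_instance

-- ===== CLAIM (what is proved, stated in full; the proofs are below) =====
def Claim_equal_is_valid_reverse_path : Prop := ∀ (lp : String), Dom_is_valid_reverse_path lp → Spec_is_valid_reverse_path lp (is_valid_reverse_path lp)

-- ===== LEMMAS AND PROOFS =====

theorem pv_digit_not_alpha (c : Char) (h : PySem.Chars.isdigit c = true) :
    PySem.Chars.isalpha c = false := by
  have e0 : ('0' : Char).val.toNat = 48 := by decide
  have e9 : ('9' : Char).val.toNat = 57 := by decide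
  have eA : ('A' : Char).val.toNat = 65 := by decide
  have ea : ('a' : Char).val.toNat = 97 := by decide
  simp only [PySem.Chars.isdigit, Bool.and_eq_true, decide_eq_true_eq, Char.le_def,
    UInt32.le_iff_toNat_le] at h
  simp only [PySem.Chars.isalpha, PySem.Chars.isupper, PySem.Chars.islower, Bool.or_eq_false_iff,
    Bool.and_eq_false_iff, decide_eq_false_iff_not, Char.le_def, UInt32.le_iff_toNat_le]
  omega

theorem pv_strip_eq : ∀ s, pvA_lstripSpTab s = pvB_dropSpTab s := by
  intro s
  induction s with
  | nil => rfl
  | cons c r ih => simp only [pvA_lstripSpTab, pvB_dropSpTab]; split_ifs <;> simp [ih]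

theorem pv_tail_eq (s : List Char) : pvA_is_valid s = pvB_tail s := by
  simp only [pvA_is_valid, pvB_tail, pv_strip_eq]
  cases h1 : PySem.Chars.startswith (pvB_dropSpTab s) ['\n'] <;>
    cases h2 : PySem.Chars.endswith (pvB_dropSpTab s) ['\n'] <;> simp_all

theorem pv_dom_eq : ∀ n : Nat,
    (∀ (d : List Char) (dot : Int), d.length ≤ n →
      pvA_is_valid_domain d dot = pvB_labelStart d) ∧
    (∀ (r : List Char) (i : Nat) (dot : Int), r.length ≤ n → i ≠ 0 →
      pvA_domLoop r i dot = pvB_labelBody r) := by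
  intro n
  induction n with
  | zero =>
    constructor
    · intro d dot hd
      have : d = [] := List.eq_nil_of_length_eq_zero (Nat.le_zero.mp hd)
      subst this
      rw [pvA_is_valid_domain.eq_def, pvB_labelStart.eq_def]
    · intro r i dot hr _
      have : r = [] := List.eq_nil_of_length_eq_zero (Nat.le_zero.mp hr)
      subst this
      rw [pvA_domLoop.eq_def, pvB_labelBody.eq_def]
  | succ n ih =>
    constructor
    · rintro (_ | ⟨c, r⟩) dot hd
      · rw [pvA_is_valid_domain.eq_def, pvB_labelStart.eq_def]
      · have hr : r.length ≤ n := by simp at hd; omega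
        rw [pvA_is_valid_domain.eq_def, pvB_labelStart.eq_def]
        cases hdig : PySem.Chars.isdigit c with
        | true => simp [hdig, pv_digit_not_alpha c hdig]
        | false =>
          cases ha : PySem.Chars.isalpha c with
          | true =>
            simp only [hdig, ha, Bool.false_eq_true, if_false, if_true]
            rw [pvA_domLoop.eq_def]
            simp only [ha, hdig, Bool.true_or, if_true]
            exact ih.2 r 1 dot hr one_ne_zero
          | false =>
            simp only [hdig, ha, Bool.false_eq_true, if_false]
            rw [pvA_domLoop.eq_def]
            simp [ha, hdig]
    · rintro (_ | ⟨c, rest⟩) i dot hr hi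
      · rw [pvA_domLoop.eq_def, pvB_labelBody.eq_def]
      · have hrest : rest.length ≤ n := by simp at hr; omega
        rw [pvA_domLoop.eq_def, pvB_labelBody.eq_def]
        cases hal : (PySem.Chars.isalpha c || PySem.Chars.isdigit c) with
        | true =>
          simp only [hal, if_true]
          exact ih.2 rest (i + 1) dot hrest (Nat.succ_ne_zero i)
        | false =>
          simp only [hal, Bool.false_eq_true, if_false, if_neg hi]
          split_ifs with hgt hdot
          · exact pv_tail_eq rest
          · exact ih.1 rest (dot + 1) hrest
          · rfl

theorem pv_domain_eq (d : List Char) (dot : Int) :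
    pvA_is_valid_domain d dot = pvB_labelStart d :=
  (pv_dom_eq d.length).1 d dot le_rfl

theorem pv_splitAt1_append (pre rest : List Char) (h : '@' ∉ pre) :
    (pvA_splitAt1 (pre ++ '@' :: rest)).2 = some rest := by
  induction pre with
  | nil => simp [pvA_splitAt1]
  | cons c p ih =>
    have hc : c ≠ '@' := fun e => h (by simp [e])
    have hp : '@' ∉ p := fun m => h (by simp [m])
    simp [pvA_splitAt1, hc, ih hp]

theorem pv_scan_eq : ∀ (s pre : List Char), (∀ c ∈ pre, c ∉ pvA_specials) →
    pvA_scan (pre ++ s) s pre.length =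
      (match pvB_findSpecial s pre.length with
       | none => pvRejParam
       | some (i, c, r) => if i = 0 ∨ c ≠ '@' then pvRejParam else pvB_labelStart r) := by
  intro s
  induction s with
  | nil => intro pre _; rfl
  | cons c rest ih =>
    intro pre hpre
    by_cases hc : c ∈ pvA_specials
    · have hc' : c ∈ pvB_specials := hc
      simp only [pvA_scan, pvB_findSpecial, hc, hc', if_pos]
      by_cases h0 : pre.length = 0
      · simp [h0]
      · by_cases hat : c = '@'
        · subst hat
          have hsplit := pv_splitAt1_append pre rest (fun m => hpre '@' m hc)
          simp [h0, hsplit, pv_domain_eq]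
        · simp [h0, hat]
    · have hc' : c ∉ pvB_specials := hc
      simp only [pvA_scan, pvB_findSpecial, hc, hc', if_neg, not_false_iff]
      have hpre' : ∀ x ∈ pre ++ [c], x ∉ pvA_specials := by
        intro x hx
        rcases List.mem_append.mp hx with h | h
        · exact hpre x h
        · simpa using (List.mem_singleton.mp h) ▸ hc
      have := ih (pre ++ [c]) hpre'
      simpa [List.append_assoc] using this

-- ===== VERDICT (by name: the statement is the Claim_ definition above) =====
theorem is_valid_reverse_path_spec : Claim_equal_is_valid_reverse_path := by
  unfold Claim_equal_is_valid_reverse_path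
  intro lp _
  unfold Spec_is_valid_reverse_path
  unfold is_valid_reverse_path is_valid_reverse_path_alt
  cases h : lp.toList with
  | nil => simp [pvB_findSpecial]
  | cons c r =>
    have := pv_scan_eq (c :: r) [] (by simp)
    simp only [List.nil_append, List.length_nil] at this
    simp [this]
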